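-- pv_equiv track=rewrite | github.com/ansarul543/pos-inventory | hrate.py | rateHide
-- ===== SOURCE A (Python) =====
-- def rateHide(val):
--     if val!="":
--         data=""
--         for i,v in enumerate(val):
--             if v=="0":
--                 data=data+"A"
--             if v=="1":
--                 data=data+"B"
--             if v=="2":
--                 data=data+"C"
--             if v=="3":
--                 data=data+"D"
--             if v=="4":
--                 data=data+"E"
--             if v=="5":
--                 data=data+"F"
--             if v=="6":
--                 data=data+"G"
--             if v=="7":
--                 data=data+"H"
--             if v=="8":
--                 data=data+"I"
--             if v=="9":
--                 data=data+"J"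
--         return data
--     else:
--         return ""
-- ===== SOURCE B (Python) =====
-- def rateHide(val):
--     return "".join(chr(ord('A') + ord(v) - ord('0')) for v in val if v.isdigit())
-- ===== Notes on version B (the rewrite author's own statement) =====
-- stated objective: simpler
-- what changed: Replaces the accumulator loop with a ten-way if-chain by a one-line join over a generator that maps each digit character to a letter via a closed-form ordinal offset, dropping non-digits with isdigit and the redundant empty-string branch.
import Mathlib
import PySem

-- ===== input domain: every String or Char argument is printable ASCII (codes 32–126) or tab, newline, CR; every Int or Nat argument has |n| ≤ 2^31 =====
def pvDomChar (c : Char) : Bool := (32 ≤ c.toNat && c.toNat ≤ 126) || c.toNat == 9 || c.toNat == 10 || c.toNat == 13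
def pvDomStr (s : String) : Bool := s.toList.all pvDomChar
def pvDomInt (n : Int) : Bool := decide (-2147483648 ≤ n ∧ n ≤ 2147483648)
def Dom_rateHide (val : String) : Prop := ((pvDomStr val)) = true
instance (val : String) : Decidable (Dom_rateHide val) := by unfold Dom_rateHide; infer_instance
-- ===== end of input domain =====

-- B replaces A's ten-way if-chain and accumulator loop by a single filterMap using the
-- closed-form offset chr(ord('A')+ord(v)-ord('0')) on digit characters (simpler, same O(n) cost).


-- ===== PORT A =====
-- one iteration of A's loop body: the ten independent `if` statements, in order
def rateStepA (data : List Char) (v : Char) : List Char :=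
  let d0 := if v = '0' then data ++ ['A'] else data
  let d1 := if v = '1' then d0 ++ ['B'] else d0
  let d2 := if v = '2' then d1 ++ ['C'] else d1
  let d3 := if v = '3' then d2 ++ ['D'] else d2
  let d4 := if v = '4' then d3 ++ ['E'] else d3
  let d5 := if v = '5' then d4 ++ ['F'] else d4
  let d6 := if v = '6' then d5 ++ ['G'] else d5
  let d7 := if v = '7' then d6 ++ ['H'] else d6
  let d8 := if v = '8' then d7 ++ ['I'] else d7
  let d9 := if v = '9' then d8 ++ ['J'] else d8
  d9

def rateHide (val : String) : String :=
  if val ≠ "" then String.ofList (val.toList.foldl rateStepA []) else ""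

-- ===== PORT B =====
def rateHide_alt (val : String) : String :=
  String.ofList (val.toList.filterMap (fun v =>
    if PySem.Chars.isdigit v then some (Char.ofNat ('A'.toNat + v.toNat - '0'.toNat)) else none))

-- ===== PRECONDITION & SPEC =====
def Spec_rateHide (val : String) (out : String) : Prop := out = rateHide_alt val
instance (val : String) (out : String) : Decidable (Spec_rateHide val out) := by unfold Spec_rateHide; infer_instance

-- ===== CLAIM (what is proved, stated in full; the proofs are below) =====
def Claim_equal_rateHide : Prop := ∀ (val : String), Dom_rateHide val → Spec_rateHide val (rateHide val)

-- ===== LEMMAS AND PROOFS =====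

-- B's per-character function
def rateCh (v : Char) : Option Char :=
  if PySem.Chars.isdigit v then some (Char.ofNat ('A'.toNat + v.toNat - '0'.toNat)) else none

-- a digit character is one of the ten literals
lemma digit_cases (c : Char) (h : PySem.Chars.isdigit c = true) :
    c = '0' ∨ c = '1' ∨ c = '2' ∨ c = '3' ∨ c = '4' ∨
    c = '5' ∨ c = '6' ∨ c = '7' ∨ c = '8' ∨ c = '9' := by
  have h' : ('0' ≤ c && c ≤ '9') = true := h
  simp [Char.le_def, UInt32.le_iff_toNat_le] at h'
  obtain ⟨h1, h2⟩ := h'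
  have he : Char.ofNat c.toNat = c := Char.ofNat_toNat c
  interval_cases hn : c.toNat <;> (rw [← he]; decide)

-- one A-step appends exactly what B emits for that character
lemma step_eq (acc : List Char) (c : Char) :
    rateStepA acc c = acc ++ (rateCh c).toList := by
  by_cases h : PySem.Chars.isdigit c = true
  · rcases digit_cases c h with rfl|rfl|rfl|rfl|rfl|rfl|rfl|rfl|rfl|rfl <;> rfl
  · have hnd : ∀ d : Char, PySem.Chars.isdigit d = true → c ≠ d := by
      intro d hd he; exact h (he ▸ hd)
    simp [rateStepA, rateCh, h,
      hnd '0' (by decide), hnd '1' (by decide), hnd '2' (by decide), hnd '3' (by decide),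
      hnd '4' (by decide), hnd '5' (by decide), hnd '6' (by decide), hnd '7' (by decide),
      hnd '8' (by decide), hnd '9' (by decide)]

lemma foldl_eq (l : List Char) (acc : List Char) :
    l.foldl rateStepA acc = acc ++ l.filterMap rateCh := by
  induction l generalizing acc with
  | nil => simp
  | cons c l ih =>
    simp only [List.foldl_cons, ih, step_eq, List.filterMap_cons]
    cases rateCh c <;> simp

-- ===== VERDICT (by name: the statement is the Claim_ definition above) =====
theorem rateHide_spec : Claim_equal_rateHide := by
  intro val _
  show rateHide val = rateHide_alt val
  unfold rateHide rateHide_alt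
  by_cases h : val = ""
  · subst h; rfl
  · simp only [h, ne_eq, not_false_eq_true, if_true]
    rw [foldl_eq]
    rfl
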